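-- pv_equiv track=rewrite | github.com/mpivet-p/AdventOfCode2024 | d7/part2/main.py | get_all_comb
-- ===== SOURCE A (Python) =====
-- def get_all_comb(length, op_str):
--   if len(op_str) == length:
--     return [op_str]
--
--   res = []
--   res += get_all_comb(length, op_str + "*")
--   res += get_all_comb(length, op_str + "+")
--   res += get_all_comb(length, op_str + "|")
--
--   return res
-- ===== SOURCE B (Python) =====
-- def get_all_comb(length, op_str):
--     res = [op_str]
--     for _ in range(length - len(op_str)):
--         res = [s + c for s in res for c in "*+|"]
--     return res
-- ===== Notes on version B (the rewrite author's own statement) =====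
-- stated objective: simpler
-- what changed: Replaces the recursive DFS over suffix extensions by an iterative breadth-first loop that extends every current string by '*','+','|' once per remaining position.
-- outside the precondition, e.g. on get_all_comb(1, 'ab'): A raises RecursionError, B returns ['ab']
import Mathlib
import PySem

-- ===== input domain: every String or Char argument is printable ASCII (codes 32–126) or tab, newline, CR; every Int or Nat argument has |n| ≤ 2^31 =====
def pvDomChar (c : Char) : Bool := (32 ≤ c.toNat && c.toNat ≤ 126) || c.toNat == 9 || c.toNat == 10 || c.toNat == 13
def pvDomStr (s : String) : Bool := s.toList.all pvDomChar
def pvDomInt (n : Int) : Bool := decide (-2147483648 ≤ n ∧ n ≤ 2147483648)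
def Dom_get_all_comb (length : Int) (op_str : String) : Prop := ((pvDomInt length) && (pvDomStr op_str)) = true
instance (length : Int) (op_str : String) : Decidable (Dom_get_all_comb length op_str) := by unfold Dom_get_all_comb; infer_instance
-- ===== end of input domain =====

-- B replaces A's recursive DFS by an iterative breadth-first extension loop; same output list, no speed claim.
-- Return-value equivalence only; neither version mutates its arguments.

-- ===== PORT A =====
-- A's recursion terminates only when len(op_str) ≤ length (it grows op_str by one char per level);
-- the fuel (length - len(op_str)).toNat + 1 is exactly the recursion depth on those inputs.
def getAllCombGo (fuel : Nat) (length : Int) (op : List Char) : List String :=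
  match fuel with
  | 0 => []
  | fuel + 1 =>
    if (op.length : Int) = length then [String.ofList op]
    else
      getAllCombGo fuel length (op ++ ['*']) ++
      getAllCombGo fuel length (op ++ ['+']) ++
      getAllCombGo fuel length (op ++ ['|'])

def get_all_comb (length : Int) (op_str : String) : List String :=
  getAllCombGo ((length - (op_str.toList.length : Int)).toNat + 1) length op_str.toList

-- ===== PORT B =====
-- res = [s + c for s in res for c in "*+|"]
def getAllCombStep (res : List String) : List String :=
  res.flatMap (fun s => "*+|".toList.map (fun c => String.ofList (s.toList ++ [c])))

def get_all_comb_alt (length : Int) (op_str : String) : List String :=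
  (PySem.List.pyRange 0 (length - (op_str.toList.length : Int)) 1).foldl
    (fun res _ => getAllCombStep res) [op_str]

-- ===== PRECONDITION & SPEC =====
-- Pre_ excludes len(op_str) > length, where A recurses forever (RecursionError); B returns [op_str] there.
def Pre_get_all_comb (length : Int) (op_str : String) : Prop :=
  (op_str.toList.length : Int) ≤ length
instance (length : Int) (op_str : String) : Decidable (Pre_get_all_comb length op_str) := by
  unfold Pre_get_all_comb; infer_instance

def pvWitness_get_all_comb : Int × String := (2, "")

def Spec_get_all_comb (length : Int) (op_str : String) (out : List String) : Prop :=
  out = get_all_comb_alt length op_str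
instance (length : Int) (op_str : String) (out : List String) : Decidable (Spec_get_all_comb length op_str out) := by
  unfold Spec_get_all_comb; infer_instance

-- ===== CLAIM (what is proved, stated in full; the proofs are below) =====
def Claim_equal_get_all_comb : Prop := ∀ (length : Int) (op_str : String), Dom_get_all_comb length op_str → Pre_get_all_comb length op_str → Spec_get_all_comb length op_str (get_all_comb length op_str)


-- ===== LEMMAS AND PROOFS =====

-- Reference enumeration: all extensions of op by n operator characters, DFS order.
def extComb : Nat → List Char → List String
  | 0, op => [String.ofList op]
  | n + 1, op => extComb n (op ++ ['*']) ++ extComb n (op ++ ['+']) ++ extComb n (op ++ ['|'])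

lemma goA_eq_ext (n : Nat) : ∀ (op : List Char) (length : Int),
    (op.length : Int) + n = length → getAllCombGo (n + 1) length op = extComb n op := by
  induction n with
  | zero => intro op length h; simp [getAllCombGo, extComb, ← h]
  | succ n ih =>
    intro op length h
    have hne : (op.length : Int) ≠ length := by omega
    rw [getAllCombGo, if_neg hne, extComb]
    rw [ih (op ++ ['*']) length (by simp; omega),
        ih (op ++ ['+']) length (by simp; omega),
        ih (op ++ ['|']) length (by simp; omega)]

def iterStep : Nat → List String → List String
  | 0, res => res
  | n + 1, res => iterStep n (getAllCombStep res)

lemma step_append (a b : List String) :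
    getAllCombStep (a ++ b) = getAllCombStep a ++ getAllCombStep b := by
  simp [getAllCombStep]

lemma iterStep_append (n : Nat) : ∀ (a b : List String),
    iterStep n (a ++ b) = iterStep n a ++ iterStep n b := by
  induction n with
  | zero => intro a b; rfl
  | succ n ih => intro a b; simp [iterStep, step_append, ih]

lemma iterStep_singleton (n : Nat) : ∀ (op : List Char),
    iterStep n [String.ofList op] = extComb n op := by
  induction n with
  | zero => intro op; rfl
  | succ n ih =>
    intro op
    show iterStep n (getAllCombStep [String.ofList op]) = _
    have hstep : getAllCombStep [String.ofList op] =
        [String.ofList (op ++ ['*'])] ++ [String.ofList (op ++ ['+'])] ++ [String.ofList (op ++ ['|'])] := by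
      simp [getAllCombStep]
    rw [hstep, iterStep_append, iterStep_append, ih, ih, ih, extComb]

lemma foldl_const_step (l : List Int) : ∀ (res : List String),
    l.foldl (fun res _ => getAllCombStep res) res = iterStep l.length res := by
  induction l with
  | nil => intro res; rfl
  | cons x xs ih => intro res; simp [List.foldl, ih, iterStep]

-- ===== VERDICT (by name: the statement is the Claim_ definition above) =====
theorem get_all_comb_spec : Claim_equal_get_all_comb := by
  intro length op_str _ hpre
  unfold Spec_get_all_comb get_all_comb get_all_comb_alt
  rw [foldl_const_step, PySem.List.length_pyRange_one]
  simp only [Int.sub_zero]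
  have h0 : (0:Int) ≤ length - (op_str.toList.length : Int) := by
    simpa [Pre_get_all_comb, sub_nonneg] using hpre
  have hmk : [op_str] = [String.ofList op_str.toList] := by simp
  rw [hmk, iterStep_singleton]
  have harg : ((op_str.toList.length : Int)) + ((length - (op_str.toList.length : Int)).toNat : Int) = length := by
    omega
  rw [goA_eq_ext _ _ _ harg]
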